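-- pv_equiv track=rewrite | github.com/Nvann07/TinterCRUD-2-_069 | Tkinter3.py | prediksi_fakultas
-- ===== SOURCE A (Python) =====
-- def prediksi_fakultas(biologi, fisika, inggris):
--     nilai = {
--         "Kedokteran": biologi,
--         "Teknik": fisika,
--         "Bahasa": inggris
--     }
--     nilai_tertinggi = max(nilai.values())
--     for fakultas, nilai_prodi in nilai.items():
--         if nilai_prodi == nilai_tertinggi:
--             return fakultas
--     return "Tidak Diketahui"
-- ===== SOURCE B (Python) =====
-- def prediksi_fakultas(biologi, fisika, inggris):
--     if biologi >= fisika and biologi >= inggris: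
--         return "Kedokteran"
--     if fisika >= inggris:
--         return "Teknik"
--     return "Bahasa"
-- ===== Notes on version B (the rewrite author's own statement) =====
-- stated objective: simpler
-- what changed: Replaced the dict build, max() scan and first-match loop with a direct comparison chain over the three arguments (biologi wins ties, then fisika, matching the dict insertion order).
import Mathlib
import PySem

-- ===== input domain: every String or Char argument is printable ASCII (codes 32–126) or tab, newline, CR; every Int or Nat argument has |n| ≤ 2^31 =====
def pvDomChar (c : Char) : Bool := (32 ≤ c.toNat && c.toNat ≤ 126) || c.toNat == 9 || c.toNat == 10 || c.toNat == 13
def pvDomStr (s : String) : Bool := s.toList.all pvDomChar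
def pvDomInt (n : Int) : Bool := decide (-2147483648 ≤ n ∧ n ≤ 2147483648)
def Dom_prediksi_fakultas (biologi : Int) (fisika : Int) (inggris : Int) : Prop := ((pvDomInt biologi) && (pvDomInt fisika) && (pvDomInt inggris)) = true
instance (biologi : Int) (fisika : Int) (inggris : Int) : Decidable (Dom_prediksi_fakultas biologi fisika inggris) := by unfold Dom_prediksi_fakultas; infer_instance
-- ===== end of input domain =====

-- B replaces A's dict + max() + first-match loop with a direct comparison chain; objective: simpler.

-- ===== PORT A =====
def prediksi_fakultas (biologi : Int) (fisika : Int) (inggris : Int) : String :=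
  -- nilai = {"Kedokteran": biologi, "Teknik": fisika, "Bahasa": inggris}
  let nilai : List (String × Int) :=
    [("Kedokteran", biologi), ("Teknik", fisika), ("Bahasa", inggris)]
  -- nilai_tertinggi = max(nilai.values())  (nonempty, never raises)
  match PySem.List.max? (nilai.map Prod.snd) (fun v => v) with
  | none => "Tidak Diketahui"
  | some nilai_tertinggi =>
    -- for fakultas, nilai_prodi in nilai.items(): if nilai_prodi == nilai_tertinggi: return fakultas
    match nilai.find? (fun p => p.2 == nilai_tertinggi) with
    | some p => p.1
    | none => "Tidak Diketahui"

-- ===== PORT B =====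
def prediksi_fakultas_alt (biologi : Int) (fisika : Int) (inggris : Int) : String :=
  if biologi ≥ fisika && biologi ≥ inggris then "Kedokteran"
  else if fisika ≥ inggris then "Teknik"
  else "Bahasa"

-- ===== PRECONDITION & SPEC =====
def Spec_prediksi_fakultas (biologi : Int) (fisika : Int) (inggris : Int) (out : String) : Prop := out = prediksi_fakultas_alt biologi fisika inggris
instance (biologi : Int) (fisika : Int) (inggris : Int) (out : String) : Decidable (Spec_prediksi_fakultas biologi fisika inggris out) := by unfold Spec_prediksi_fakultas; infer_instance

-- ===== CLAIM (what is proved, stated in full; the proofs are below) =====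
def Claim_equal_prediksi_fakultas : Prop := ∀ (biologi : Int) (fisika : Int) (inggris : Int), Dom_prediksi_fakultas biologi fisika inggris → Spec_prediksi_fakultas biologi fisika inggris (prediksi_fakultas biologi fisika inggris)

-- ===== LEMMAS AND PROOFS =====

-- ===== VERDICT (by name: the statement is the Claim_ definition above) =====
theorem prediksi_fakultas_spec : Claim_equal_prediksi_fakultas := by
  intro b f i _
  unfold Spec_prediksi_fakultas prediksi_fakultas prediksi_fakultas_alt
  simp only [List.map, PySem.List.max?_id_cons, List.foldl, List.find?]
  rcases le_total f b with h1 | h1 <;> rcases le_total i b with h2 | h2 <;>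
    rcases le_total i f with h3 | h3 <;> rcases eq_or_ne b i with h4 | h4 <;>
    rcases eq_or_ne f i with h5 | h5 <;> rcases eq_or_ne b f with h6 | h6 <;>
    simp_all [BEq.beq] <;> (try split_ifs) <;> first | rfl | omega
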